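-- pv_equiv track=rewrite | github.com/animeshokhade/dsa | scaler/Generate Array.py | solve
-- ===== SOURCE A (Python) =====
-- def solve(A):
--     for index, ele in enumerate(A):
--         bitIndex = 0
--         while not ele & 1:
--             bitIndex += 1
--             ele >>= 1
--         A[index] = 1 << bitIndex
--     return A
-- ===== SOURCE B (Python) =====
-- def solve(A):
--     A[:] = [e & -e for e in A]
--     return A
-- ===== Notes on version B (the rewrite author's own statement) =====
-- stated objective: faster
-- what changed: Replaces the per-element while-loop that counts trailing zeros by shifting with the O(1) two's-complement identity e & -e isolating the lowest set bit, in a single list comprehension; Pre_ excludes lists containing 0, on which A's while-loop never terminates.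
-- outside the precondition, e.g. on solve([0]): A does not finish within the time limit, B returns [0]
import Mathlib
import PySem

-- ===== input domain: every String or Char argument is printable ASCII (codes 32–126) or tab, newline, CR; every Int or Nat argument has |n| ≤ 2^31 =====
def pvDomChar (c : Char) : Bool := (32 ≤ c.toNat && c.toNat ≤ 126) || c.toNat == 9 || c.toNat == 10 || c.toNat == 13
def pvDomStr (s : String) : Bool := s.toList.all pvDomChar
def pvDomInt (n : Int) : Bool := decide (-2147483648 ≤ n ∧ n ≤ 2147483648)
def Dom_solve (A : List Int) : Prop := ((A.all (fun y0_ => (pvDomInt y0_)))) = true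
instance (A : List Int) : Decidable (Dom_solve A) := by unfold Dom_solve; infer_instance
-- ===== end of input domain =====

-- B replaces A's per-element shift-and-count while-loop by the O(1) bit trick e & -e;
-- return-value equivalence only: A mutates its argument in place (Source B mutates it too via A[:] = ...).

-- ===== PORT A =====
-- the while-loop 'while not ele & 1: bitIndex += 1; ele >>= 1'; fuel = |ele| only makes the
-- recursion total (it exceeds the number of iterations for every nonzero ele; Pre_ excludes 0,
-- where the Python loop never terminates)
def solveLoop (fuel : Nat) (ele : Int) (bitIndex : Nat) : Int :=
  match fuel with
  | 0 => (1 : Int) <<< bitIndex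
  | fuel + 1 =>
    if PySem.Int.band ele 1 = 0 then solveLoop fuel (ele >>> (1 : Nat)) (bitIndex + 1)
    else (1 : Int) <<< bitIndex

-- 'for index, ele in enumerate(A): A[index] = 1 << bitIndex' rewrites each slot from its old value
def solve (A : List Int) : List Int :=
  A.map (fun ele => solveLoop ele.natAbs ele 0)

-- ===== PORT B =====
def solve_alt (A : List Int) : List Int :=
  A.map (fun e => PySem.Int.band e (-e))

-- ===== PRECONDITION & SPEC =====
-- Pre_ excludes lists containing 0: there A's while-loop runs forever (0 & 1 == 0 and 0 >> 1 == 0).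
def Pre_solve (A : List Int) : Prop := ∀ e ∈ A, e ≠ 0
instance (A : List Int) : Decidable (Pre_solve A) := by unfold Pre_solve; infer_instance

def pvWitness_solve : List Int := [12, -8, 7, -1, 1024]

def Spec_solve (A : List Int) (out : List Int) : Prop := out = solve_alt A
instance (A : List Int) (out : List Int) : Decidable (Spec_solve A out) := by unfold Spec_solve; infer_instance

-- ===== CLAIM (what is proved, stated in full; the proofs are below) =====
def Claim_equal_solve : Prop := ∀ (A : List Int), Dom_solve A → Pre_solve A → Spec_solve A (solve A)

-- ===== LEMMAS AND PROOFS =====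

-- f m = m - (m &&& (m-1)) is the lowest set bit of m (Nat side)
def pvLowbit (m : Nat) : Nat := m - (m &&& (m - 1))

theorem pvLowbit_odd (m : Nat) (h : m % 2 = 1) : pvLowbit m = 1 := by
  obtain ⟨t, rfl⟩ : ∃ t, m = 2 * t + 1 := ⟨m / 2, by omega⟩
  have hb : (2 * t + 1) &&& (2 * t) = 2 * t := by
    have := Nat.land_bit true t false t
    simpa [Nat.bit, Nat.and_self, two_mul] using this
  have h1 : 2 * t + 1 - 1 = 2 * t := by omega
  simp only [pvLowbit, h1, hb]
  omega

theorem pvLowbit_even (m : Nat) (h0 : 0 < m) (h : m % 2 = 0) :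
    pvLowbit m = 2 * pvLowbit (m / 2) := by
  obtain ⟨t, rfl⟩ : ∃ t, m = 2 * t := ⟨m / 2, by omega⟩
  have ht : 0 < t := by omega
  have hm1 : 2 * t - 1 = 2 * (t - 1) + 1 := by omega
  have hb : (2 * t) &&& (2 * t - 1) = 2 * (t &&& (t - 1)) := by
    rw [hm1]
    have := Nat.land_bit false t true (t - 1)
    simpa [Nat.bit, two_mul] using this
  have ht1 : (2 * t) / 2 - 1 = t - 1 := by omega
  have hle : t &&& (t - 1) ≤ t := Nat.and_le_left
  simp only [pvLowbit, hb, Nat.mul_div_cancel_left _ (by norm_num : 0 < 2)]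
  omega

-- band e (-e) in terms of pvLowbit on |e|
theorem band_neg_self_eq (e : Int) (he : e ≠ 0) :
    PySem.Int.band e (-e) = (pvLowbit e.natAbs : Int) := by
  unfold PySem.Int.band
  rcases lt_trichotomy e 0 with hlt | h0 | hgt
  · rw [if_neg (by omega), if_pos (by omega : (0:Int) ≤ -e)]
    have ha : (-e).toNat = e.natAbs := by omega
    have hb : (- e - 1).toNat = e.natAbs - 1 := by omega
    rw [ha, hb]; rfl
  · exact absurd h0 he
  · rw [if_pos (by omega : (0:Int) ≤ e), if_neg (by omega : ¬ (0:Int) ≤ -e)]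
    have ha : e.toNat = e.natAbs := by omega
    have hb : (- -e - 1).toNat = e.natAbs - 1 := by omega
    rw [ha, hb]; rfl

theorem band_one_zero_iff (e : Int) : PySem.Int.band e 1 = 0 ↔ e.natAbs % 2 = 0 := by
  rw [PySem.Int.band_one, PySem.Int.mod_eq_zero_iff_dvd]
  have h2 : (2 : Int).natAbs = 2 := rfl
  constructor
  · intro h
    have := Int.natAbs_dvd_natAbs.mpr h
    rw [h2] at this
    omega
  · intro h
    refine Int.natAbs_dvd_natAbs.mp ?_
    rw [h2]
    omega

theorem shiftRight_one_even (e : Int) (h : e.natAbs % 2 = 0) :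
    (e >>> (1 : Nat)).natAbs = e.natAbs / 2 ∧ (e >>> (1 : Nat)) ≠ 0 ∨ e = 0 := by
  rcases eq_or_ne e 0 with rfl | he
  · right; rfl
  · left
    obtain ⟨c, rfl⟩ : ∃ c, e = 2 * c := by
      have h2 : (2 : Int).natAbs = 2 := rfl
      have : (2 : Int) ∣ e := by
        refine Int.natAbs_dvd_natAbs.mp ?_
        rw [h2]
        omega
      exact this
    have hr : (2 * c) >>> (1 : Nat) = c := by
      rw [Int.shiftRight_eq_div_pow]
      norm_num [Int.mul_ediv_cancel_left]
    have hc : c ≠ 0 := by rintro rfl; simp at he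
    refine ⟨?_, by simpa [hr] using hc⟩
    rw [hr]
    omega

theorem solveLoop_eq (fuel : Nat) :
    ∀ (e : Int) (k : Nat), e ≠ 0 → e.natAbs ≤ fuel →
      solveLoop fuel e k = 2 ^ k * (pvLowbit e.natAbs : Int) := by
  induction fuel with
  | zero => intro e k he hle; omega
  | succ fuel ih =>
    intro e k he hle
    by_cases hb : PySem.Int.band e 1 = 0
    · have hev : e.natAbs % 2 = 0 := (band_one_zero_iff e).mp hb
      rcases shiftRight_one_even e hev with ⟨hna, hne⟩ | h0
      · have hle' : (e >>> (1 : Nat)).natAbs ≤ fuel := by omega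
        have := ih (e >>> (1 : Nat)) (k + 1) hne hle'
        rw [solveLoop, if_pos hb, this, hna,
            pvLowbit_even e.natAbs (by omega) hev]
        push_cast
        ring
      · exact absurd h0 he
    · have hodd : e.natAbs % 2 = 1 := by
        have := band_one_zero_iff e
        omega
      rw [solveLoop, if_neg hb, pvLowbit_odd e.natAbs hodd,
          Int.shiftLeft_eq]
      push_cast
      ring

theorem solveLoop_eq_band (e : Int) (he : e ≠ 0) :
    solveLoop e.natAbs e 0 = PySem.Int.band e (-e) := by
  rw [solveLoop_eq e.natAbs e 0 he le_rfl, band_neg_self_eq e he]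
  ring

-- ===== VERDICT (by name: the statement is the Claim_ definition above) =====
theorem solve_spec : Claim_equal_solve := by
  intro A _ hPre
  unfold Spec_solve solve solve_alt
  refine List.map_congr_left ?_
  intro e he
  exact solveLoop_eq_band e (hPre e he)
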